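-- pv_equiv track=rewrite | github.com/nv0-nv0/1 | server_app.py | robots_allows_path
-- ===== SOURCE A (Python) =====
-- from typing import Any
--
-- def robots_allows_path(path: str, robots: dict[str, Any]) -> bool:
--     allow_rules = robots.get('allow') or []
--     disallow_rules = robots.get('disallow') or []
--     best_allow = max((len(rule) for rule in allow_rules if path.startswith(rule)), default=-1)
--     best_disallow = max((len(rule) for rule in disallow_rules if path.startswith(rule)), default=-1)
--     if best_disallow == -1:
--         return True
--     return best_allow >= best_disallow
-- ===== SOURCE B (Python) =====
-- def robots_allows_path(path: str, robots) -> bool: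
--     # Different decomposition: put the rules into hash sets, collect the
--     # distinct rule lengths that can match, and walk the corresponding
--     # prefixes of path from longest to shortest, returning on the first
--     # prefix found in a set (allow checked first, so allow wins ties);
--     # no hit at all means allowed.
--     allow = set(robots.get('allow') or [])
--     disallow = set(robots.get('disallow') or [])
--     for k in sorted({len(r) for r in allow | disallow if len(r) <= len(path)}, reverse=True):
--         p = path[:k]
--         if p in allow:
--             return True
--         if p in disallow:
--             return False
--     return True
-- ===== Notes on version B (the rewrite author's own statement) =====
-- stated objective: alternative
-- what changed: Instead of scanning the rule lists with startswith and comparing the two best match lengths against a -1 sentinel, B puts the rules into hash sets, collects the distinct rule lengths, and looks the corresponding prefixes of path up in the sets from longest to shortest, returning on the first hit (allow checked first, so allow wins ties); no hit means allowed.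
import Mathlib
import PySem

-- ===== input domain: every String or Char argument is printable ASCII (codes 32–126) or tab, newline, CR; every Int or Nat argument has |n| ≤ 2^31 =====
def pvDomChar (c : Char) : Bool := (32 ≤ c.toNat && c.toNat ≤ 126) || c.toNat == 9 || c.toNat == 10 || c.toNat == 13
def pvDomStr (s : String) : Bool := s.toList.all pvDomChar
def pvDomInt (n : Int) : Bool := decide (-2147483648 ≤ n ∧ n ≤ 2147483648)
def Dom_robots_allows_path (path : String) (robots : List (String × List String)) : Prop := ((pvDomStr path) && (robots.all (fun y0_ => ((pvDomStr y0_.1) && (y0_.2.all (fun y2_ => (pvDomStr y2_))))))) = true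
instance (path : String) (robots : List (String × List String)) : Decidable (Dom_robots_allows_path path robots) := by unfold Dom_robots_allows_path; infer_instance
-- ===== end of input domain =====

-- B replaces A's best-match-length comparison by set lookups of path's prefixes at the distinct candidate rule lengths, longest first (alternative decomposition).

-- ===== PORT A =====
-- robots.get(k) or []  (association list, first match; a falsy value and a missing key both give [])
def pvLookup (robots : List (String × List String)) (k : String) : List String :=
  match robots.find? (fun kv => kv.1 == k) with
  | some kv => kv.2
  | none => []

def robots_allows_path (path : String) (robots : List (String × List String)) : Bool :=
  let allow_rules := pvLookup robots "allow"
  let disallow_rules := pvLookup robots "disallow"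
  let best_allow : Int := (PySem.List.max? ((allow_rules.filter (fun rule => PySem.Str.startswith path rule)).map (fun rule => PySem.Str.len rule)) (fun x => x)).getD (-1)
  let best_disallow : Int := (PySem.List.max? ((disallow_rules.filter (fun rule => PySem.Str.startswith path rule)).map (fun rule => PySem.Str.len rule)) (fun x => x)).getD (-1)
  if best_disallow = -1 then true else decide (best_allow ≥ best_disallow)

-- ===== PORT B =====
-- the 'for k in sorted(..., reverse=True)' loop with early returns, as recursion over the length list
def scanLens (path : String) (aS dS : PySem.Set String) : List Int → Bool
  | [] => true
  | k :: rest =>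
    let p := PySem.Str.slice path none (some k)
    if PySem.Set.contains aS p then true
    else if PySem.Set.contains dS p then false
    else scanLens path aS dS rest

def robots_allows_path_alt (path : String) (robots : List (String × List String)) : Bool :=
  let allow := PySem.Set.ofList (pvLookup robots "allow")
  let disallow := PySem.Set.ofList (pvLookup robots "disallow")
  -- sorted({len(r) for r in allow | disallow if len(r) <= len(path)}, reverse=True)
  let lens := PySem.List.sorted
    (PySem.Set.ofList (((PySem.Set.union allow disallow).filter
      (fun r => PySem.Str.len r ≤ PySem.Str.len path)).map (fun r => PySem.Str.len r)))
    (fun x => x) true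
  scanLens path allow disallow lens

-- ===== PRECONDITION & SPEC =====
def Spec_robots_allows_path (path : String) (robots : List (String × List String)) (out : Bool) : Prop := out = robots_allows_path_alt path robots
instance (path : String) (robots : List (String × List String)) (out : Bool) : Decidable (Spec_robots_allows_path path robots out) := by unfold Spec_robots_allows_path; infer_instance

-- ===== CLAIM (what is proved, stated in full; the proofs are below) =====
def Claim_equal_robots_allows_path : Prop := ∀ (path : String) (robots : List (String × List String)), Dom_robots_allows_path path robots → Spec_robots_allows_path path robots (robots_allows_path path robots)

-- ===== LEMMAS AND PROOFS =====

-- A's best matching-rule length for one rule list (−1 if none matches)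
def pvBest (path : String) (rules : List String) : Int :=
  (PySem.List.max? ((rules.filter (fun rule => PySem.Str.startswith path rule)).map (fun rule => PySem.Str.len rule)) (fun x => x)).getD (-1)

-- 'some rule of exactly length k matches path'
def pvM (path : String) (rules : List String) (k : Nat) : Prop :=
  ∃ r ∈ rules, PySem.Str.startswith path r = true ∧ r.toList.length = k

lemma startswith_iff_prefix (path r : String) :
    PySem.Str.startswith path r = true ↔ r.toList <+: path.toList := by
  rw [PySem.Str.startswith_eq]
  simp [PySem.Chars.startswith, List.isPrefixOf_iff_prefix]

lemma contains_slice_iff (path : String) (rules : List String) (k : Nat)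
    (hk : k ≤ path.toList.length) :
    PySem.Set.contains (PySem.Set.ofList rules) (PySem.Str.slice path none (some (k : Int))) = true
      ↔ pvM path rules k := by
  rw [show PySem.Set.contains (PySem.Set.ofList rules) (PySem.Str.slice path none (some (k : Int))) = true
      ↔ PySem.Str.slice path none (some (k : Int)) ∈ PySem.Set.ofList rules from by
    simp [PySem.Set.contains]]
  rw [PySem.Set.mem_ofList]
  constructor
  · intro hmem
    refine ⟨_, hmem, ?_, ?_⟩
    · rw [startswith_iff_prefix, PySem.Str.toList_slice, PySem.Chars.slice_eq_listSlice,
        PySem.List.slice_to_natCast]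
      exact List.take_prefix k path.toList
    · rw [PySem.Str.toList_slice, PySem.Chars.slice_eq_listSlice, PySem.List.slice_to_natCast,
        List.length_take]
      omega
  · rintro ⟨r, hr, hsw, hlen⟩
    have hpre := (startswith_iff_prefix path r).mp hsw
    have : r.toList = (PySem.Str.slice path none (some (k : Int))).toList := by
      rw [PySem.Str.toList_slice, PySem.Chars.slice_eq_listSlice, PySem.List.slice_to_natCast,
        ← hlen]
      exact List.prefix_iff_eq_take.mp hpre
    rwa [← String.toList_inj.mp this]

lemma pvBest_ge (path : String) (rules : List String) (k : Nat) (h : pvM path rules k) :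
    (k : Int) ≤ pvBest path rules := by
  obtain ⟨r, hr, hsw, hlen⟩ := h
  have hmem : (PySem.Str.len r) ∈ (rules.filter (fun rule => PySem.Str.startswith path rule)).map (fun rule => PySem.Str.len rule) :=
    List.mem_map.mpr ⟨r, List.mem_filter.mpr ⟨hr, hsw⟩, rfl⟩
  unfold pvBest
  cases hmx : PySem.List.max? ((rules.filter (fun rule => PySem.Str.startswith path rule)).map (fun rule => PySem.Str.len rule)) (fun x => x) with
  | none =>
    rw [PySem.List.max?_eq_none_iff] at hmx
    rw [hmx] at hmem; exact absurd hmem List.not_mem_nil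
  | some m =>
    have := PySem.List.max?_isMax hmx _ hmem
    rw [PySem.Str.len_eq, hlen] at this
    simpa using this

lemma pvBest_le (path : String) (rules : List String) (k : Nat)
    (h : ∀ r ∈ rules, PySem.Str.startswith path r = true → r.toList.length ≤ k) :
    pvBest path rules ≤ (k : Int) := by
  unfold pvBest
  cases hmx : PySem.List.max? ((rules.filter (fun rule => PySem.Str.startswith path rule)).map (fun rule => PySem.Str.len rule)) (fun x => x) with
  | none => simp
  | some m =>
    have hm := PySem.List.max?_mem hmx
    rcases List.mem_map.mp hm with ⟨r, hrf, hrl⟩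
    rcases List.mem_filter.mp hrf with ⟨hr, hsw⟩
    have := h r hr (by simpa using hsw)
    rw [← hrl, PySem.Str.len_eq]
    simp only [Option.getD_some]
    omega

lemma pvBest_lt (path : String) (rules : List String) (k : Nat)
    (h : ∀ r ∈ rules, PySem.Str.startswith path r = true → r.toList.length ≤ k)
    (hnm : ¬ pvM path rules k) :
    pvBest path rules < (k : Int) := by
  rcases Nat.eq_zero_or_pos k with rfl | hkpos
  · -- no matching rule at all, so the filtered list is empty and pvBest = -1
    have hemp : rules.filter (fun rule => PySem.Str.startswith path rule) = [] := by
      rw [List.filter_eq_nil_iff]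
      intro r hr hsw
      exact hnm ⟨r, hr, by simpa using hsw, Nat.le_zero.mp (h r hr (by simpa using hsw))⟩
    unfold pvBest
    rw [hemp]
    simp [(PySem.List.max?_eq_none_iff ([] : List Int) (fun x => x)).mpr rfl]
  · have h' : ∀ r ∈ rules, PySem.Str.startswith path r = true → r.toList.length ≤ k - 1 := by
      intro r hr hsw
      have h1 := h r hr hsw
      have h2 : r.toList.length ≠ k := fun he => hnm ⟨r, hr, hsw, he⟩
      omega
    have := pvBest_le path rules (k - 1) h'
    omega

lemma pvBest_neg_one (path : String) (rules : List String)
    (h : ∀ r ∈ rules, PySem.Str.startswith path r ≠ true) :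
    pvBest path rules = -1 := by
  have hemp : rules.filter (fun rule => PySem.Str.startswith path rule) = [] := by
    rw [List.filter_eq_nil_iff]
    intro r hr hsw
    exact h r hr (by simpa using hsw)
  unfold pvBest
  rw [hemp]
  simp [(PySem.List.max?_eq_none_iff ([] : List Int) (fun x => x)).mpr rfl]

lemma scan_eq (path : String) (allows disallows : List String) :
    ∀ lens : List Int,
    (∀ x ∈ lens, 0 ≤ x ∧ x ≤ (path.toList.length : Int)) →
    lens.Pairwise (fun a b => b ≤ a) →
    lens.Nodup →
    (∀ r ∈ allows, PySem.Str.startswith path r = true → (r.toList.length : Int) ∈ lens) →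
    (∀ r ∈ disallows, PySem.Str.startswith path r = true → (r.toList.length : Int) ∈ lens) →
    scanLens path (PySem.Set.ofList allows) (PySem.Set.ofList disallows) lens =
      (if pvBest path disallows = -1 then true
       else decide (pvBest path allows ≥ pvBest path disallows)) := by
  intro lens
  induction lens with
  | nil =>
    intro _ _ _ hA hD
    have hbd : pvBest path disallows = -1 :=
      pvBest_neg_one path disallows (fun r hr hsw => absurd (hD r hr hsw) List.not_mem_nil)
    simp [scanLens, hbd]
  | cons k rest ih =>
    intro hb hp hn hA hD
    obtain ⟨hk0, hkle⟩ := hb k List.mem_cons_self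
    have hkcast : k = ((k.toNat : Nat) : Int) := by omega
    have hkn : k.toNat ≤ path.toList.length := by omega
    have hrest_le : ∀ x ∈ rest, x ≤ k := (List.pairwise_cons.mp hp).1
    have hknotin : k ∉ rest := (List.nodup_cons.mp hn).1
    -- every matched rule length is ≤ k.toNat
    have hAle : ∀ r ∈ allows, PySem.Str.startswith path r = true → r.toList.length ≤ k.toNat := by
      intro r hr hsw
      rcases List.mem_cons.mp (hA r hr hsw) with he | hm
      · omega
      · have := hrest_le _ hm; omega
    have hDle : ∀ r ∈ disallows, PySem.Str.startswith path r = true → r.toList.length ≤ k.toNat := by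
      intro r hr hsw
      rcases List.mem_cons.mp (hD r hr hsw) with he | hm
      · omega
      · have := hrest_le _ hm; omega
    rw [scanLens]
    by_cases ha : PySem.Set.contains (PySem.Set.ofList allows) (PySem.Str.slice path none (some k)) = true
    · have hMA := (contains_slice_iff path allows k.toNat hkn).mp (by rwa [← hkcast])
      have h1 := pvBest_ge path allows k.toNat hMA
      have h2 := pvBest_le path disallows k.toNat hDle
      simp only [ha, if_true]
      split_ifs with hbd
      · rfl
      · simp; omega
    · by_cases hd : PySem.Set.contains (PySem.Set.ofList disallows) (PySem.Str.slice path none (some k)) = true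
      · have hMD := (contains_slice_iff path disallows k.toNat hkn).mp (by rwa [← hkcast])
        have hNA : ¬ pvM path allows k.toNat := fun hm =>
          ha (by rw [hkcast]; exact (contains_slice_iff path allows k.toNat hkn).mpr hm)
        have h1 := pvBest_ge path disallows k.toNat hMD
        have h2 := pvBest_lt path allows k.toNat hAle hNA
        simp only [ha, if_false, Bool.false_eq_true, hd, if_true]
        rw [if_neg (by omega)]
        simp; omega
      · have hNA : ¬ pvM path allows k.toNat := fun hm =>
          ha (by rw [hkcast]; exact (contains_slice_iff path allows k.toNat hkn).mpr hm)
        have hND : ¬ pvM path disallows k.toNat := fun hm =>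
          hd (by rw [hkcast]; exact (contains_slice_iff path disallows k.toNat hkn).mpr hm)
        simp only [ha, hd, Bool.false_eq_true, if_false]
        apply ih (fun x hx => hb x (List.mem_cons_of_mem _ hx)) (List.pairwise_cons.mp hp).2
          (List.nodup_cons.mp hn).2
        · intro r hr hsw
          rcases List.mem_cons.mp (hA r hr hsw) with he | hm
          · exact absurd ⟨r, hr, hsw, by omega⟩ hNA
          · exact hm
        · intro r hr hsw
          rcases List.mem_cons.mp (hD r hr hsw) with he | hm
          · exact absurd ⟨r, hr, hsw, by omega⟩ hND
          · exact hm

lemma matched_len_le (path r : String) (hsw : PySem.Str.startswith path r = true) :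
    r.toList.length ≤ path.toList.length :=
  ((startswith_iff_prefix path r).mp hsw).length_le

-- membership in B's candidate-length list, for matched rules
lemma mem_lens (path : String) (allows disallows : List String) (r : String)
    (hr : r ∈ allows ∨ r ∈ disallows) (hsw : PySem.Str.startswith path r = true) :
    (r.toList.length : Int) ∈ PySem.List.sorted
      (PySem.Set.ofList (((PySem.Set.union (PySem.Set.ofList allows) (PySem.Set.ofList disallows)).filter
        (fun x => PySem.Str.len x ≤ PySem.Str.len path)).map (fun x => PySem.Str.len x)))
      (fun x => x) true := by
  rw [PySem.List.mem_sorted, PySem.Set.mem_ofList]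
  refine List.mem_map.mpr ⟨r, List.mem_filter.mpr ⟨?_, ?_⟩, (PySem.Str.len_eq r).symm⟩
  · exact (PySem.Set.mem_union _ _ r).mpr
      (hr.imp ((PySem.Set.mem_ofList allows r).mpr) ((PySem.Set.mem_ofList disallows r).mpr))
  · simp only [PySem.Str.len_eq, decide_eq_true_eq]
    exact_mod_cast matched_len_le path r hsw

-- ===== VERDICT (by name: the statement is the Claim_ definition above) =====
theorem robots_allows_path_spec : Claim_equal_robots_allows_path := by
  intro path robots _
  unfold Spec_robots_allows_path robots_allows_path robots_allows_path_alt
  rw [scan_eq path (pvLookup robots "allow") (pvLookup robots "disallow") _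
    ?_ ?_ ?_
    (fun r hr hsw => mem_lens path _ _ r (Or.inl hr) hsw)
    (fun r hr hsw => mem_lens path _ _ r (Or.inr hr) hsw)]
  · rfl
  · -- bounds on the sorted length list
    intro x hx
    rw [PySem.List.mem_sorted, PySem.Set.mem_ofList] at hx
    rcases List.mem_map.mp hx with ⟨r, hrf, hrl⟩
    rcases List.mem_filter.mp hrf with ⟨_, hcond⟩
    simp only [PySem.Str.len_eq, decide_eq_true_eq] at hcond
    rw [← hrl, PySem.Str.len_eq]
    constructor
    · positivity
    · exact hcond
  · exact PySem.List.sorted_pairwise_rev _ _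
  · exact ((PySem.List.sorted_perm _ _ true).nodup_iff).mpr (PySem.Set.nodup_ofList _)
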